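-- pv_equiv track=rewrite | github.com/addtheletters/HS-AI | school/nqueens.py | findFewestAttacks
-- ===== SOURCE A (Python) =====
-- def findFewestAttacks( perms, original ):
--   best = original
--   fewest = countAttacks(original)
--   for perm in perms:
--     attacks = countAttacks(perm)
--     if attacks <= fewest:
--       best = perm
--       fewest = attacks
--   return best
--
-- def countAttacks( board ):
--   #     only counts diagonal attacks!
--   size  = len(board)
--   count = 0
--   for index in range(size):
--     qplace = board[index]
--     for row in range(size):
--       dist = row - index
--       if dist == 0:
--         continue
--       if board[row] == qplace - dist or board[row] == qplace + dist:
--         count += 1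
--   return count // 2 #should always be a whole number...
-- ===== SOURCE B (Python) =====
-- def findFewestAttacks(perms, original):
--     best = original
--     fewest = _diagonalAttacks(original)
--     for perm in perms:
--         attacks = _diagonalAttacks(perm)
--         if attacks <= fewest:
--             best = perm
--             fewest = attacks
--     return best
--
--
-- def _diagonalAttacks(board):
--     # Count attacking pairs per diagonal (key row-col) and anti-diagonal
--     # (key row+col): k queens on one diagonal attack in C(k,2) pairs.
--     diag = {}
--     anti = {}
--     for i, q in enumerate(board):
--         d = q - i
--         a = q + i
--         diag[d] = diag.get(d, 0) + 1
--         anti[a] = anti.get(a, 0) + 1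
--     total = 0
--     for c in diag.values():
--         total += c * (c - 1) // 2
--     for c in anti.values():
--         total += c * (c - 1) // 2
--     return total
-- ===== Notes on version B (the rewrite author's own statement) =====
-- stated objective: faster
-- what changed: Replaces the quadratic all-pairs diagonal scan per board with a single pass that buckets queens by row-col and row+col in two dicts and sums C(k,2) per bucket.
import Mathlib
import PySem

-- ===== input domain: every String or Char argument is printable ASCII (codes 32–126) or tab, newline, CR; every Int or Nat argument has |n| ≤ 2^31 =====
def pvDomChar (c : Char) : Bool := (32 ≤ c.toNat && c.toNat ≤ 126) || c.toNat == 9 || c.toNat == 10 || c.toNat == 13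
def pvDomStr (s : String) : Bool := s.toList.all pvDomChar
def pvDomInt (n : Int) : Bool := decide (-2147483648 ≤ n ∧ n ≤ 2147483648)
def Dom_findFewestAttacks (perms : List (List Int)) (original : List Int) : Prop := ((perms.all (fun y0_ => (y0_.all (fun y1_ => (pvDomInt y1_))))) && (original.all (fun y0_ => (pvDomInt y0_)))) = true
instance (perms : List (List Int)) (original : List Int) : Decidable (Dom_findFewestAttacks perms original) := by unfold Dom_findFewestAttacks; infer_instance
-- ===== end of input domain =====

-- B replaces A's quadratic all-pairs diagonal scan per board by one pass that
-- buckets queens by row-col / row+col in two dicts and sums C(k,2) per bucket.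

-- ===== PORT A =====
-- helper countAttacks of A, transliterated
def countAttacksA (board : List Int) : Int :=
  let size : Int := PySem.List.len board
  let count : Int :=
    (PySem.List.pyRange 0 size).foldl (fun count index =>
      let qplace := PySem.List.pyGetD board index 0
      (PySem.List.pyRange 0 size).foldl (fun count row =>
        let dist := row - index
        if dist = 0 then count
        else if PySem.List.pyGetD board row 0 = qplace - dist ∨
                PySem.List.pyGetD board row 0 = qplace + dist then count + 1
        else count) count) 0
  PySem.Int.floordiv count 2

def findFewestAttacks (perms : List (List Int)) (original : List Int) : List Int :=
  let st := perms.foldl (fun (bf : List Int × Int) perm =>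
      let attacks := countAttacksA perm
      if attacks ≤ bf.2 then (perm, attacks) else bf)
    (original, countAttacksA original)
  st.1

-- ===== PORT B =====
-- helper _diagonalAttacks of B, transliterated
def diagonalAttacksB (board : List Int) : Int :=
  let da := (PySem.List.enumerate board).foldl
    (fun (da : PySem.Dict Int Int × PySem.Dict Int Int) iq =>
      let d := iq.2 - iq.1
      let a := iq.2 + iq.1
      (da.1.insert d (da.1.getD d 0 + 1), da.2.insert a (da.2.getD a 0 + 1)))
    (PySem.Dict.empty, PySem.Dict.empty)
  let t1 := da.1.values.foldl (fun t c => t + PySem.Int.floordiv (c * (c - 1)) 2) 0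
  da.2.values.foldl (fun t c => t + PySem.Int.floordiv (c * (c - 1)) 2) t1

def findFewestAttacks_alt (perms : List (List Int)) (original : List Int) : List Int :=
  let st := perms.foldl (fun (bf : List Int × Int) perm =>
      let attacks := diagonalAttacksB perm
      if attacks ≤ bf.2 then (perm, attacks) else bf)
    (original, diagonalAttacksB original)
  st.1

-- ===== PRECONDITION & SPEC =====
def Spec_findFewestAttacks (perms : List (List Int)) (original : List Int) (out : List Int) : Prop := out = findFewestAttacks_alt perms original
instance (perms : List (List Int)) (original : List Int) (out : List Int) : Decidable (Spec_findFewestAttacks perms original out) := by unfold Spec_findFewestAttacks; infer_instance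

-- ===== CLAIM (what is proved, stated in full; the proofs are below) =====
def Claim_equal_findFewestAttacks : Prop := ∀ (perms : List (List Int)) (original : List Int), Dom_findFewestAttacks perms original → Spec_findFewestAttacks perms original (findFewestAttacks perms original)

-- ===== LEMMAS AND PROOFS =====

-- diagonal / anti-diagonal key of each queen
def dkeys (b : List Int) : List Int :=
  (PySem.List.pyRange 0 (PySem.List.len b)).map (fun j => PySem.List.pyGetD b j 0 - j)
def akeys (b : List Int) : List Int :=
  (PySem.List.pyRange 0 (PySem.List.len b)).map (fun j => PySem.List.pyGetD b j 0 + j)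

def cnt (l : List Int) (k : Int) : Int := (l.count k : Int)

-- Σ over distinct keys of c(c-1)  (A's ordered-pair total per family)
def Fsum (l : List Int) : Int := ∑ k ∈ l.toFinset, cnt l k * (cnt l k - 1)
-- Σ over distinct keys of c(c-1)//2  (B's total per family)
def Hsum (l : List Int) : Int := ∑ k ∈ l.toFinset, PySem.Int.floordiv (cnt l k * (cnt l k - 1)) 2

lemma F_eq_two_H (l : List Int) : Fsum l = 2 * Hsum l := by
  unfold Fsum Hsum
  rw [Finset.mul_sum]
  refine Finset.sum_congr rfl (fun k _ => ?_)
  rw [PySem.Int.floordiv_eq_ediv_of_pos (by norm_num)]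
  have h : Even (cnt l k * (cnt l k - 1)) := by
    simpa [mul_comm] using Int.even_mul_succ_self (cnt l k - 1)
  obtain ⟨m, hm⟩ := h
  omega

lemma counter_values_sum (ks : List Int) :
    ((PySem.Dict.counter ks).values.map (fun c => PySem.Int.floordiv (c * (c - 1)) 2)).sum
      = Hsum ks := by
  show (((PySem.Dict.counter ks).items.map (·.2)).map _).sum = _
  rw [PySem.Dict.items_counter]
  simp only [List.map_map]
  have hnd := PySem.Set.nodup_ofList ks
  have hts : (PySem.Set.ofList ks).toFinset = ks.toFinset := by
    ext x; simp [PySem.Set.mem_ofList]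
  unfold Hsum cnt
  rw [← List.sum_toFinset _ hnd, hts]
  rfl

lemma B_char (b : List Int) : diagonalAttacksB b = Hsum (dkeys b) + Hsum (akeys b) := by
  unfold diagonalAttacksB
  rw [PySem.List.enumerate_eq_map_pyRange b 0,
    PySem.List.foldl_prod_mk
      (f := fun (d : PySem.Dict Int Int) (iq : Int × Int) => d.insert (iq.2 - iq.1) (d.getD (iq.2 - iq.1) 0 + 1))
      (g := fun (d : PySem.Dict Int Int) (iq : Int × Int) => d.insert (iq.2 + iq.1) (d.getD (iq.2 + iq.1) 0 + 1))]
  have hd : (List.foldl (fun (d : PySem.Dict Int Int) (iq : Int × Int) =>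
        d.insert (iq.2 - iq.1) (d.getD (iq.2 - iq.1) 0 + 1)) PySem.Dict.empty
        ((PySem.List.pyRange 0 (PySem.List.len b)).map (fun j => (j, PySem.List.pyGetD b j 0))))
      = PySem.Dict.counter (dkeys b) := by
    rw [← PySem.Dict.foldl_insert_getD_add_one_eq_counter (dkeys b)]
    simp [List.foldl_map, dkeys]
  have ha : (List.foldl (fun (d : PySem.Dict Int Int) (iq : Int × Int) =>
        d.insert (iq.2 + iq.1) (d.getD (iq.2 + iq.1) 0 + 1)) PySem.Dict.empty
        ((PySem.List.pyRange 0 (PySem.List.len b)).map (fun j => (j, PySem.List.pyGetD b j 0))))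
      = PySem.Dict.counter (akeys b) := by
    rw [← PySem.Dict.foldl_insert_getD_add_one_eq_counter (akeys b)]
    simp [List.foldl_map, akeys]
  simp only [hd, ha]
  rw [PySem.List.foldl_add _ _ 0, PySem.List.foldl_add, counter_values_sum, counter_values_sum]
  ring

lemma countP_key (R : List Int) (key : Int → Int) (i : Int)
    (hnd : R.Nodup) (hi : i ∈ R) :
    ((R.map key).count (key i) : Int)
      = (R.countP (fun r => decide (r ≠ i ∧ key r = key i)) : Int) + 1 := by
  rw [List.count, List.countP_map]
  rw [← PySem.List.sum_map_ite_one_zero, ← PySem.List.sum_map_ite_one_zero]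
  have hsplit : (R.map (fun r => if ((fun x => x == key i) ∘ key) r then (1:Int) else 0)).sum
      = (R.map (fun r => (if decide (r ≠ i ∧ key r = key i) then (1:Int) else 0)
          + (if r == i then (1:Int) else 0))).sum := by
    apply congrArg
    apply List.map_congr_left
    intro r _
    by_cases hri : r = i <;> simp [hri]
  rw [hsplit, PySem.List.sum_map_add_int, PySem.List.sum_map_ite_one_zero,
    PySem.List.sum_map_ite_one_zero]
  have hone : List.countP (fun r => r == i) R = 1 := by
    have := List.count_eq_one_of_mem hnd hi
    simpa [List.count] using this
  rw [hone]; norm_num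

-- one pass of A's inner loop counts the other queens sharing i's diagonal or anti-diagonal
lemma inner_loop (b : List Int) (i : Int)
    (hi : i ∈ PySem.List.pyRange 0 (PySem.List.len b)) (c : Int) :
    (PySem.List.pyRange 0 (PySem.List.len b)).foldl (fun count row =>
        let dist := row - i
        if dist = 0 then count
        else if PySem.List.pyGetD b row 0 = PySem.List.pyGetD b i 0 - dist ∨
                PySem.List.pyGetD b row 0 = PySem.List.pyGetD b i 0 + dist then count + 1
        else count) c
    = c + ((cnt (dkeys b) (PySem.List.pyGetD b i 0 - i) - 1)
         + (cnt (akeys b) (PySem.List.pyGetD b i 0 + i) - 1)) := by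
  set R := PySem.List.pyRange 0 (PySem.List.len b) with hR
  have hnd : R.Nodup := PySem.List.nodup_pyRange_one 0 _
  rw [PySem.List.foldl_congr_mem R _
     (fun count row => if (decide (row - i ≠ 0 ∧ (PySem.List.pyGetD b row 0 = PySem.List.pyGetD b i 0 - (row - i) ∨
          PySem.List.pyGetD b row 0 = PySem.List.pyGetD b i 0 + (row - i)))) then count + 1 else count) c
     (by intro acc x _; simp only; split_ifs <;> simp_all)]
  rw [PySem.List.foldl_count_if]
  -- the two families are disjoint for row ≠ i, so the 0/1 indicators add
  have hsplit : ((R.countP (fun row => decide (row - i ≠ 0 ∧ (PySem.List.pyGetD b row 0 = PySem.List.pyGetD b i 0 - (row - i) ∨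
          PySem.List.pyGetD b row 0 = PySem.List.pyGetD b i 0 + (row - i))))) : Int)
      = (R.countP (fun r => decide (r ≠ i ∧ (fun j => PySem.List.pyGetD b j 0 - j) r = (fun j => PySem.List.pyGetD b j 0 - j) i)) : Int)
      + (R.countP (fun r => decide (r ≠ i ∧ (fun j => PySem.List.pyGetD b j 0 + j) r = (fun j => PySem.List.pyGetD b j 0 + j) i)) : Int) := by
    rw [← PySem.List.sum_map_ite_one_zero, ← PySem.List.sum_map_ite_one_zero, ← PySem.List.sum_map_ite_one_zero,
      ← PySem.List.sum_map_add_int]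
    apply congrArg
    apply List.map_congr_left
    intro r _
    simp only
    split_ifs with h1 h2 h3 h2 h3 h3 <;> simp only [decide_eq_true_eq] at * <;> omega
  rw [hsplit]
  have hd := countP_key R (fun j => PySem.List.pyGetD b j 0 - j) i hnd hi
  have ha := countP_key R (fun j => PySem.List.pyGetD b j 0 + j) i hnd hi
  simp only at hd ha
  unfold cnt dkeys akeys
  rw [← hR]
  simp only at *
  omega

-- summing "my count minus one" over all queens groups into Σ c(c-1) per distinct key
lemma famsum (R : List Int) (key : Int → Int) :
    (R.map (fun i => cnt (R.map key) (key i) - 1)).sum = Fsum (R.map key) := by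
  set l := R.map key with hl
  have h1 : (R.map (fun i => cnt l (key i) - 1)).sum
      = (l.map (fun x => cnt l x - 1)).sum := by
    rw [hl, List.map_map]; rfl
  rw [h1, Finset.sum_list_map_count l (fun x => cnt l x - 1)]
  unfold Fsum cnt
  refine Finset.sum_congr rfl (fun k _ => ?_)
  simp

lemma A_char (b : List Int) :
    countAttacksA b = PySem.Int.floordiv (Fsum (dkeys b) + Fsum (akeys b)) 2 := by
  unfold countAttacksA
  simp only
  apply congrArg (fun t => PySem.Int.floordiv t 2)
  set R := PySem.List.pyRange 0 (PySem.List.len b) with hR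
  rw [PySem.List.foldl_congr_mem R _
    (fun count i => count + ((cnt (dkeys b) (PySem.List.pyGetD b i 0 - i) - 1)
         + (cnt (akeys b) (PySem.List.pyGetD b i 0 + i) - 1))) 0
    (by intro acc i hi; exact inner_loop b i hi acc)]
  rw [PySem.List.foldl_add, PySem.List.sum_map_add_int]
  have hd := famsum R (fun j => PySem.List.pyGetD b j 0 - j)
  have ha := famsum R (fun j => PySem.List.pyGetD b j 0 + j)
  unfold dkeys akeys
  rw [← hR]
  simp only at hd ha ⊢
  rw [hd, ha]
  ring

lemma count_eq (b : List Int) : countAttacksA b = diagonalAttacksB b := by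
  rw [A_char, B_char, F_eq_two_H, F_eq_two_H, ← Nat.cast_ofNat (n := 2), ← mul_add,
    PySem.Int.floordiv_eq_ediv_of_pos (by norm_num)]
  simp

-- ===== VERDICT (by name: the statement is the Claim_ definition above) =====
theorem findFewestAttacks_spec : Claim_equal_findFewestAttacks := by
  intro perms original _
  unfold Spec_findFewestAttacks findFewestAttacks findFewestAttacks_alt
  simp only [count_eq]
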